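-- pv_equiv track=rewrite | github.com/Djordje-Stojanovic/StockIQ | src/agents/strategic_agent.py | _get_expertise_depth_config
-- ===== SOURCE A (Python) =====
-- def _get_expertise_depth_config(expertise_level: int) -> dict:
--     """Map expertise level to analysis depth configuration."""
--     depth_map = {
--         (1, 2): {
--             "depth_name": "Foundational",
--             "pages": "250-300",
--             "detail": "comprehensive with educational explanations",
--         },
--         (3, 4): {
--             "depth_name": "Educational",
--             "pages": "150-200",
--             "detail": "detailed with strategic context",
--         },
--         (5, 6): {
--             "depth_name": "Intermediate",
--             "pages": "80-100",
--             "detail": "focused strategic analysis",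
--         },
--         (7, 8): {
--             "depth_name": "Advanced",
--             "pages": "50-60",
--             "detail": "executive-level strategic insights",
--         },
--         (9, 10): {
--             "depth_name": "Executive",
--             "pages": "10-20",
--             "detail": "strategic summary with key implications",
--         },
--     }
--
--     for level_range, config in depth_map.items():
--         if level_range[0] <= expertise_level <= level_range[1]:
--             return config
--
--     return {
--         "depth_name": "Intermediate",
--         "pages": "80-100",
--         "detail": "focused strategic analysis",
--     }
-- ===== SOURCE B (Python) =====
-- _NAMES = ["Foundational", "Educational", "Intermediate", "Advanced", "Executive"]
-- _PAGES = ["250-300", "150-200", "80-100", "50-60", "10-20"]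
-- _DETAILS = [
--     "comprehensive with educational explanations",
--     "detailed with strategic context",
--     "focused strategic analysis",
--     "executive-level strategic insights",
--     "strategic summary with key implications",
-- ]
--
--
-- def _get_expertise_depth_config(expertise_level: int) -> dict:
--     """Map expertise level to analysis depth configuration."""
--     i = (expertise_level - 1) // 2 if 1 <= expertise_level <= 10 else 2
--     return {"depth_name": _NAMES[i], "pages": _PAGES[i], "detail": _DETAILS[i]}
-- ===== Notes on version B (the rewrite author's own statement) =====
-- stated objective: idiomatic
-- what changed: Replaces A's per-call range-keyed dict and linear scan with three module-level parallel field columns indexed directly by a closed-form arithmetic halving of the level, defaulting to the Intermediate column outside the valid range.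
import Mathlib
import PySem

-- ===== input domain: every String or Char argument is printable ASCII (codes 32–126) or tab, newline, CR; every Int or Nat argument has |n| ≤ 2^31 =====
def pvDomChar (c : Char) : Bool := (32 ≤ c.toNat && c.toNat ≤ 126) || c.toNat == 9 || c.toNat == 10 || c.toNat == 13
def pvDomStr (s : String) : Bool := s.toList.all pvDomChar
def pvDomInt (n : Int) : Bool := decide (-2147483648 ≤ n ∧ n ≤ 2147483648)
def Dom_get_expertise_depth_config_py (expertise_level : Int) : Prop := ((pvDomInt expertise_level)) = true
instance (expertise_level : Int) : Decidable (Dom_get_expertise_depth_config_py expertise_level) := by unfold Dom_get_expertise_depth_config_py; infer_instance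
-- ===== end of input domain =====

-- B replaces A's per-call range-keyed dict scan with three constant field columns indexed by a closed-form arithmetic index (idiomatic; same results everywhere).


-- ===== PORT A =====
-- A's depth_map: dict keyed by (lo, hi) tuples, in insertion order, with inline config dicts
def depthMapA : List ((Int × Int) × List (String × String)) :=
  [((1, 2), [("depth_name", "Foundational"), ("pages", "250-300"),
             ("detail", "comprehensive with educational explanations")]),
   ((3, 4), [("depth_name", "Educational"), ("pages", "150-200"),
             ("detail", "detailed with strategic context")]),
   ((5, 6), [("depth_name", "Intermediate"), ("pages", "80-100"),
             ("detail", "focused strategic analysis")]),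
   ((7, 8), [("depth_name", "Advanced"), ("pages", "50-60"),
             ("detail", "executive-level strategic insights")]),
   ((9, 10), [("depth_name", "Executive"), ("pages", "10-20"),
              ("detail", "strategic summary with key implications")])]

-- A's for-loop with early return: scan items, first matching range wins; fall-through default
def scanDepthMap (expertise_level : Int) :
    List ((Int × Int) × List (String × String)) → List (String × String)
  | [] => [("depth_name", "Intermediate"), ("pages", "80-100"),
           ("detail", "focused strategic analysis")]
  | (level_range, config) :: rest =>
    if level_range.1 ≤ expertise_level ∧ expertise_level ≤ level_range.2 then config
    else scanDepthMap expertise_level rest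

def get_expertise_depth_config_py (expertise_level : Int) : List (String × String) :=
  scanDepthMap expertise_level depthMapA

-- ===== PORT B =====
-- B's three parallel field columns
def namesB : List String := ["Foundational", "Educational", "Intermediate", "Advanced", "Executive"]
def pagesB : List String := ["250-300", "150-200", "80-100", "50-60", "10-20"]
def detailsB : List String :=
  ["comprehensive with educational explanations", "detailed with strategic context",
   "focused strategic analysis", "executive-level strategic insights",
   "strategic summary with key implications"]

def get_expertise_depth_config_py_alt (expertise_level : Int) : List (String × String) :=
  let i : Int := if 1 ≤ expertise_level ∧ expertise_level ≤ 10
                 then PySem.Int.floordiv (expertise_level - 1) 2 else 2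
  [("depth_name", (PySem.List.pyGet? namesB i).getD ""),
   ("pages", (PySem.List.pyGet? pagesB i).getD ""),
   ("detail", (PySem.List.pyGet? detailsB i).getD "")]

-- ===== PRECONDITION & SPEC =====
def Spec_get_expertise_depth_config_py (expertise_level : Int) (out : List (String × String)) : Prop := out = get_expertise_depth_config_py_alt expertise_level
instance (expertise_level : Int) (out : List (String × String)) : Decidable (Spec_get_expertise_depth_config_py expertise_level out) := by unfold Spec_get_expertise_depth_config_py; infer_instance

-- ===== CLAIM (what is proved, stated in full; the proofs are below) =====
def Claim_equal_get_expertise_depth_config_py : Prop := ∀ (expertise_level : Int), Dom_get_expertise_depth_config_py expertise_level → Spec_get_expertise_depth_config_py expertise_level (get_expertise_depth_config_py expertise_level)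

-- ===== LEMMAS AND PROOFS =====

-- ===== VERDICT (by name: the statement is the Claim_ definition above) =====
theorem get_expertise_depth_config_py_spec : Claim_equal_get_expertise_depth_config_py := by
  intro e _
  unfold Spec_get_expertise_depth_config_py
  by_cases h : 1 ≤ e ∧ e ≤ 10
  · obtain ⟨h1, h2⟩ := h
    interval_cases e <;> decide
  · simp only [get_expertise_depth_config_py, get_expertise_depth_config_py_alt, depthMapA,
      scanDepthMap, if_neg h]
    split_ifs <;> first | rfl | omega
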